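-- pv_equiv track=rewrite | github.com/PaavoReinikka/random_code | tira/round1/allwords.py | rec
-- ===== SOURCE A (Python) =====
-- def rec(prev, inds, chars):
--
--     if len(inds)==len(chars): yield prev
--     else:
--         for i, char in enumerate(chars):
--             if i in inds:
--                 continue
--             elif prev and prev[-1]==char:
--                 continue
--             else:
--                 yield from rec(prev + char, inds + [i], chars)
-- ===== SOURCE B (Python) =====
-- # B: generate-and-test — enumerate all k-permutations of the unused index/char
-- # pairs in lexicographic order, then keep those whose newly added characters
-- # form no adjacent equal pair (against prev's last char and among themselves).
-- def kperms(pool, k):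
--     if k == 0:
--         return [()]
--     res = []
--     for j, x in enumerate(pool):
--         for rest in kperms(pool[:j] + pool[j + 1:], k - 1):
--             res.append((x,) + rest)
--     return res
--
--
-- def rec(prev, inds, chars):
--     k = len(chars) - len(inds)
--     if k < 0:
--         return
--     pool = [(i, c) for i, c in enumerate(chars) if i not in inds]
--     for perm in kperms(pool, k):
--         new = ''.join(c for _, c in perm)
--         last = prev[-1] if prev else None
--         ok = True
--         for c in new:
--             if c == last:
--                 ok = False
--                 break
--             last = c
--         if ok:
--             yield prev + new
-- ===== Notes on version B (the rewrite author's own statement) =====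
-- stated objective: alternative
-- what changed: A's incrementally pruned backtracking (skip an index as soon as it repeats the last char) is replaced by generate-and-test: enumerate all k-permutations of the unused (index, char) pairs in lexicographic order, then keep exactly those whose newly added characters contain no adjacent equal pair.
import Mathlib
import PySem

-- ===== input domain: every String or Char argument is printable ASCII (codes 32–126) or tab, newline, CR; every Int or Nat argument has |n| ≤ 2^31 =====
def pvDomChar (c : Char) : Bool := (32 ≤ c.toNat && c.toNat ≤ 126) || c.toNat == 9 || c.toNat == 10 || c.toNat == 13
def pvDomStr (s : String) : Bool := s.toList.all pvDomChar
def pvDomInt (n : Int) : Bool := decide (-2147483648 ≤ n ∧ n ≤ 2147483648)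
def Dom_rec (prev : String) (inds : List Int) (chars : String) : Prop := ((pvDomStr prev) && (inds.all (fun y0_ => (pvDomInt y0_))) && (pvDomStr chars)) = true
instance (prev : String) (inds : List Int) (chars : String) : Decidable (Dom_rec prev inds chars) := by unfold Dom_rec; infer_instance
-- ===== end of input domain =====

-- B replaces A's pruned backtracking by generate-and-test over all k-permutations
-- of the unused (index, char) pairs, filtering the newly formed adjacencies;
-- objective: alternative (same results in the same order, different algorithm).

-- ===== PORT A =====

-- the (index, char) pairs of `cs` whose index is not in `inds`; used as the
-- termination measure of `rec` (A's recursion shrinks this set) and in port B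
def pvPool (inds : List Int) (cs : List Char) : List (Int × Char) :=
  (PySem.List.enumerate cs).filter (fun p => !decide (p.1 ∈ inds))

-- strict decrease of a filter when the predicate is strengthened at a member
theorem pvFilter_length_lt {α : Type} (l : List α) (p q : α → Bool)
    (himp : ∀ x, q x = true → p x = true) (x : α) (hx : x ∈ l)
    (hp : p x = true) (hq : ¬ q x = true) :
    (l.filter q).length < (l.filter p).length := by
  induction l with
  | nil => cases hx
  | cons a t ih =>
    rcases List.mem_cons.mp hx with rfl | hmem
    · have hle : (t.filter q).length ≤ (t.filter p).length :=
        List.Sublist.length_le (List.monotone_filter_right t (fun y hy => himp y hy))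
      simp [hp, hq]
      omega
    · by_cases hqa : q a = true
      · have hpa := himp a hqa
        have := ih hmem
        simp [hqa, hpa]
        omega
      · by_cases hpa : p a = true <;> have := ih hmem <;>
          simp [hqa, hpa] <;> omega

theorem pvPool_append_lt (inds : List Int) (cs : List Char) (i : Int) (c : Char)
    (hmem : (i, c) ∈ PySem.List.enumerate cs) (hi : ¬ i ∈ inds) :
    (pvPool (inds ++ [i]) cs).length < (pvPool inds cs).length := by
  refine pvFilter_length_lt _ _ _ ?_ (i, c) hmem (by simpa using hi) (by simp)
  intro x hx
  simp only [Bool.not_eq_true', decide_eq_false_iff_not, List.mem_append,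
    List.mem_singleton] at hx ⊢
  exact fun h => hx (Or.inl h)

-- port of A: the generator's yields, in order; `yield from` appends the
-- recursive results, `prev and prev[-1]==char` is `getLast? = some char`
def rec (prev : String) (inds : List Int) (chars : String) : List String :=
  if inds.length = chars.toList.length then [prev]
  else
    (PySem.List.enumerate chars.toList).attach.foldl
      (fun acc ic =>
        if ic.1.1 ∈ inds then acc
        else if prev.toList.getLast? = some ic.1.2 then acc
        else acc ++ rec (prev.push ic.1.2) (inds ++ [ic.1.1]) chars)
      []
termination_by (pvPool inds chars.toList).length
decreasing_by
  exact pvPool_append_lt inds chars.toList ic.1.1 ic.1.2 ic.2 (by assumption)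

-- ===== PORT B =====

-- all k-permutations of pool, lexicographic by position: pool[:j]+pool[j+1:]
-- is take j ++ drop (j+1) (j comes from enumerate, so it is a valid Nat index)
def kperms : List (Int × Char) → Nat → List (List (Int × Char))
  | _, 0 => [[]]
  | pool, k + 1 =>
    (PySem.List.enumerate pool).foldl
      (fun acc jx =>
        acc ++ (kperms (pool.take jx.1.toNat ++ pool.drop (jx.1.toNat + 1)) k).map
          (fun rest => jx.2 :: rest))
      []

-- the inner for-loop of B: no char equals its predecessor (last = prev[-1] or None)
def okNew : Option Char → List Char → Bool
  | _, [] => true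
  | last, c :: rest => if some c = last then false else okNew (some c) rest

def rec_alt (prev : String) (inds : List Int) (chars : String) : List String :=
  let k : Int := (chars.toList.length : Int) - (inds.length : Int)
  if k < 0 then []
  else
    (kperms (pvPool inds chars.toList) k.toNat).foldl
      (fun acc perm =>
        let new := perm.map Prod.snd
        if okNew prev.toList.getLast? new then acc ++ [prev ++ String.ofList new] else acc)
      []

-- ===== PRECONDITION & SPEC =====
def Spec_rec (prev : String) (inds : List Int) (chars : String) (out : List String) : Prop := out = rec_alt prev inds chars
instance (prev : String) (inds : List Int) (chars : String) (out : List String) : Decidable (Spec_rec prev inds chars out) := by unfold Spec_rec; infer_instance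

-- ===== CLAIM (what is proved, stated in full; the proofs are below) =====
def Claim_equal_rec : Prop := ∀ (prev : String) (inds : List Int) (chars : String), Dom_rec prev inds chars → Spec_rec prev inds chars (rec prev inds chars)

-- ===== LEMMAS AND PROOFS =====

-- (l.filter p).flatMap g: skipped elements contribute []
theorem pvFlatMap_filter {α β : Type} (l : List α) (p : α → Bool) (g : α → List β) :
    (l.filter p).flatMap g = l.flatMap (fun x => if p x then g x else []) := by
  induction l with
  | nil => rfl
  | cons a t ih => by_cases h : p a <;> simp [h, ih]

theorem pvPool_pairwise (inds : List Int) (cs : List Char) :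
    (pvPool inds cs).Pairwise (fun p q => p.1 < q.1) :=
  List.Pairwise.filter _ (PySem.List.pairwise_lt_enumerate cs 0)

theorem pvPool_append (inds : List Int) (cs : List Char) (i : Int) :
    pvPool (inds ++ [i]) cs = (pvPool inds cs).filter (fun p => !(p.1 == i)) := by
  simp only [pvPool, List.filter_filter]
  apply List.filter_congr
  intro x _
  by_cases h1 : x.1 ∈ inds <;> by_cases h2 : x.1 = i <;> simp [h1, h2]

-- removing the element at position j from a fst-strictly-increasing list
theorem pvFilter_ne_eq_removeIdx (l : List (Int × Char))
    (hl : l.Pairwise (fun p q => p.1 < q.1)) (j : Nat) (x : Int × Char)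
    (hj : l[j]? = some x) :
    l.filter (fun p => !(p.1 == x.1)) = l.take j ++ l.drop (j + 1) := by
  induction l generalizing j with
  | nil => simp at hj
  | cons a t ih =>
    cases j with
    | zero =>
      simp only [List.getElem?_cons_zero, Option.some_inj] at hj
      subst hj
      simp only [List.filter_cons, beq_self_eq_true, Bool.not_true, if_neg Bool.false_ne_true,
        List.take_zero, List.drop_succ_cons, List.drop_zero, List.nil_append]
      apply List.filter_eq_self.mpr
      intro p hp
      have := (List.pairwise_cons.mp hl).1 p hp
      simpa using (ne_of_gt this)
    | succ j =>
      simp only [List.getElem?_cons_succ] at hj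
      have hxt : x ∈ t := List.mem_of_getElem? hj
      have hlt : a.1 < x.1 := (List.pairwise_cons.mp hl).1 x hxt
      have hne : (!(a.1 == x.1)) = true := by
        simpa using (ne_of_lt hlt)
      simp only [List.filter_cons, hne, if_pos trivial, List.take_succ_cons,
        List.drop_succ_cons, List.cons_append]
      exact congrArg _ (ih (List.Pairwise.of_cons hl) j hj)

-- one unfolding of A's port as a flatMap over the unused pool
theorem pvRec_unfold (prev : String) (inds : List Int) (chars : String)
    (hne : inds.length ≠ chars.toList.length) :
    rec prev inds chars = (pvPool inds chars.toList).flatMap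
      (fun ic => if prev.toList.getLast? = some ic.2 then []
                 else rec (prev.push ic.2) (inds ++ [ic.1]) chars) := by
  rw [rec]
  rw [if_neg hne]
  rw [show (PySem.List.enumerate chars.toList).attach.foldl
      (fun acc ic =>
        if ic.1.1 ∈ inds then acc
        else if prev.toList.getLast? = some ic.1.2 then acc
        else acc ++ rec (prev.push ic.1.2) (inds ++ [ic.1.1]) chars) []
    = (PySem.List.enumerate chars.toList).foldl
      (fun acc ic =>
        if ic.1 ∈ inds then acc
        else if prev.toList.getLast? = some ic.2 then acc
        else acc ++ rec (prev.push ic.2) (inds ++ [ic.1]) chars) [] from List.foldl_attach (f := fun (acc : List String) (ic : Int × Char) =>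
        if ic.1 ∈ inds then acc
        else if prev.toList.getLast? = some ic.2 then acc
        else acc ++ rec (prev.push ic.2) (inds ++ [ic.1]) chars) (b := [])]
  have hbody : ∀ (acc : List String) (ic : Int × Char),
      (if ic.1 ∈ inds then acc
       else if prev.toList.getLast? = some ic.2 then acc
       else acc ++ rec (prev.push ic.2) (inds ++ [ic.1]) chars)
      = acc ++ (if (!decide (ic.1 ∈ inds)) = true then
          (if prev.toList.getLast? = some ic.2 then []
           else rec (prev.push ic.2) (inds ++ [ic.1]) chars) else []) := by
    intro acc ic
    by_cases h1 : ic.1 ∈ inds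
    · simp [h1]
    · by_cases h2 : prev.toList.getLast? = some ic.2 <;> simp [h1, h2]
  rw [PySem.List.foldl_congr_mem (PySem.List.enumerate chars.toList) _
    (fun acc ic => acc ++ (if (!decide (ic.1 ∈ inds)) = true then
        (if prev.toList.getLast? = some ic.2 then []
         else rec (prev.push ic.2) (inds ++ [ic.1]) chars) else [])) []
    (fun acc x _ => hbody acc x)]
  rw [PySem.List.foldl_append_eq_flatMap, List.nil_append, pvPool, pvFlatMap_filter]

-- A on over-long inds yields nothing (the base case is never reached)
theorem pvRec_gt (chars : String) : ∀ (m : Nat) (inds : List Int) (prev : String),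
    (pvPool inds chars.toList).length ≤ m →
    chars.toList.length < inds.length → rec prev inds chars = [] := by
  intro m
  induction m with
  | zero =>
    intro inds prev hm hlt
    rw [pvRec_unfold prev inds chars (by omega)]
    rw [List.length_eq_zero_iff.mp (Nat.le_zero.mp hm)]
    rfl
  | succ m ih =>
    intro inds prev hm hlt
    rw [pvRec_unfold prev inds chars (by omega)]
    apply List.flatMap_eq_nil_iff.mpr
    intro x hx
    obtain ⟨hxe, hxn⟩ := List.mem_filter.mp hx
    split
    · rfl
    · apply ih
      · have := pvPool_append_lt inds chars.toList x.1 x.2 hxe (by simpa using hxn)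
        omega
      · simp only [List.length_append, List.length_cons, List.length_nil]; omega

-- DFS over the pool, the common intermediate form
def dfsS (prev : String) (pool : List (Int × Char)) : Nat → List String
  | 0 => [prev]
  | k + 1 => (PySem.List.enumerate pool).flatMap (fun jx =>
      if prev.toList.getLast? = some jx.2.2 then []
      else dfsS (prev.push jx.2.2)
        (pool.take jx.1.toNat ++ pool.drop (jx.1.toNat + 1)) k)

theorem pvRec_eq_dfsS (chars : String) : ∀ (k : Nat) (inds : List Int) (prev : String),
    inds.length ≤ chars.toList.length →
    chars.toList.length - inds.length = k →
    rec prev inds chars = dfsS prev (pvPool inds chars.toList) k := by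
  intro k
  induction k with
  | zero =>
    intro inds prev hle heq
    have h : inds.length = chars.toList.length := by omega
    rw [rec, if_pos h]
    rfl
  | succ k ih =>
    intro inds prev hle heq
    rw [pvRec_unfold prev inds chars (by omega), dfsS]
    conv_lhs => rw [← PySem.List.map_snd_enumerate (pvPool inds chars.toList) 0,
      List.flatMap_map]
    apply List.flatMap_congr
    intro jx hjx
    obtain ⟨j, hj, rfl⟩ := (PySem.List.mem_enumerate_iff _ _ _).mp hjx
    by_cases hlast : prev.toList.getLast? = some ((pvPool inds chars.toList)[j]).2
    · simp [hlast]
    · rw [if_neg hlast, if_neg hlast]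
      have hmemf : (pvPool inds chars.toList)[j] ∈ pvPool inds chars.toList :=
        List.getElem_mem hj
      obtain ⟨hxe, hxn⟩ := List.mem_filter.mp hmemf
      rw [ih (inds ++ [((pvPool inds chars.toList)[j]).1]) _ (by simp only [List.length_append, List.length_cons, List.length_nil]; omega) (by simp only [List.length_append, List.length_cons, List.length_nil]; omega)]
      congr 1
      rw [pvPool_append, pvFilter_ne_eq_removeIdx _ (pvPool_pairwise inds chars.toList) j _
        (List.getElem?_eq_getElem hj)]
      simp

theorem pvKperms_unfold (pool : List (Int × Char)) (k : Nat) :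
    kperms pool (k + 1) = (PySem.List.enumerate pool).flatMap (fun jx =>
      (kperms (pool.take jx.1.toNat ++ pool.drop (jx.1.toNat + 1)) k).map
        (fun rest => jx.2 :: rest)) := by
  rw [kperms, PySem.List.foldl_append_eq_flatMap, List.nil_append]

-- the filter-then-output part of B's main loop
def pvOut (prev : String) (perms : List (List (Int × Char))) : List String :=
  (perms.filter (fun perm => okNew prev.toList.getLast? (perm.map Prod.snd))).map
    (fun perm => prev ++ String.ofList (perm.map Prod.snd))

theorem pvOut_flatMap (prev : String) {α : Type} (l : List α)
    (f : α → List (List (Int × Char))) :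
    pvOut prev (l.flatMap f) = l.flatMap (fun x => pvOut prev (f x)) := by
  simp [pvOut, List.filter_flatMap, List.map_flatMap]

theorem pvStr_cons (s : String) (c : Char) (l : List Char) :
    s ++ String.ofList (c :: l) = s.push c ++ String.ofList l :=
  String.toList_injective (by simp)

theorem pvOut_map_cons (prev : String) (x : Int × Char)
    (perms : List (List (Int × Char))) :
    pvOut prev (perms.map (fun rest => x :: rest)) =
      if prev.toList.getLast? = some x.2 then [] else pvOut (prev.push x.2) perms := by
  split_ifs with h
  · simp [pvOut, List.filter_map, Function.comp_def, okNew, h]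
  · have hne : ¬ (some x.2 = prev.toList.getLast?) := fun hh => h hh.symm
    have hlast : (prev.push x.2).toList.getLast? = some x.2 := by
      rw [String.toList_push]; exact List.getLast?_concat
    simp only [pvOut, List.filter_map, List.map_map, Function.comp_def, List.map_cons,
      okNew, if_neg hne, hlast]
    apply List.map_congr_left
    intro perm _
    exact pvStr_cons prev x.2 (perm.map Prod.snd)

theorem pvDfsS_eq_pvOut : ∀ (k : Nat) (prev : String) (pool : List (Int × Char)),
    dfsS prev pool k = pvOut prev (kperms pool k) := by
  intro k
  induction k with
  | zero =>
    intro prev pool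
    simp [dfsS, kperms, pvOut, okNew]
  | succ k ih =>
    intro prev pool
    rw [dfsS, pvKperms_unfold, pvOut_flatMap]
    apply List.flatMap_congr
    intro jx _
    rw [pvOut_map_cons, ih]

theorem pvRec_alt_eq (prev : String) (inds : List Int) (chars : String)
    (hle : inds.length ≤ chars.toList.length) :
    rec_alt prev inds chars =
      pvOut prev (kperms (pvPool inds chars.toList) (chars.toList.length - inds.length)) := by
  have h0 : ¬ (((chars.toList.length : Int) - (inds.length : Int)) < 0) := by omega
  simp only [rec_alt, if_neg h0, Int.toNat_sub]
  rw [PySem.List.foldl_append_if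
    (fun (perm : List (Int × Char)) => okNew prev.toList.getLast? (perm.map Prod.snd))
    (fun (perm : List (Int × Char)) => prev ++ String.ofList (perm.map Prod.snd)),
    List.nil_append, pvOut]

-- ===== VERDICT (by name: the statement is the Claim_ definition above) =====
theorem rec_spec : Claim_equal_rec := by
  intro prev inds chars _
  unfold Spec_rec
  by_cases hle : inds.length ≤ chars.toList.length
  · rw [pvRec_alt_eq prev inds chars hle, ← pvDfsS_eq_pvOut,
      pvRec_eq_dfsS chars (chars.toList.length - inds.length) inds prev hle rfl]
  · have h0 : ((chars.toList.length : Int) - (inds.length : Int)) < 0 := by omega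
    rw [pvRec_gt chars (pvPool inds chars.toList).length inds prev le_rfl (by omega)]
    simp only [rec_alt]
    rw [if_pos h0]
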